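-- pv_equiv track=rewrite | github.com/quittung/wordle_guess | tools/lab/pattern_optimization.py | get_pattern_precise
-- ===== SOURCE A (Python) =====
-- def get_pattern_precise(guess: str, solution: str):
--     """generates the patterns for a guess"""
--     hint = ""
--     for index, letter in enumerate(guess):
--         if not letter in solution:
--             hint += "b"
--         else:
--             if letter == solution[index]:
--                 hint += "g"
--             else:
--                 # only color yellow if not already marked in other yellow or any green
--                 letter_solution = solution.count(letter)
--                 letter_green = sum([l == letter and l == solution[i] for i, l in enumerate(guess)])
--                 letter_yellow_already = sum([l == letter and l != solution[i] for i, l in enumerate(guess[:index])])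
--                 if letter_solution - letter_green - letter_yellow_already > 0:
--                     hint += "y"
--                 else:
--                     hint += "b"
--
--     return hint
-- ===== SOURCE B (Python) =====
-- def get_pattern_precise(guess: str, solution: str):
--     """generates the patterns for a guess"""
--     n = len(solution)
--     budget = {}
--     for c in solution:
--         budget[c] = budget.get(c, 0) + 1
--     for i, c in enumerate(guess):
--         if i < n and c == solution[i]:
--             budget[c] -= 1
--     out = []
--     for i, c in enumerate(guess):
--         if i < n and c == solution[i]:
--             out.append("g")
--         elif budget.get(c, 0) > 0:
--             out.append("y")
--             budget[c] -= 1
--         else: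
--             out.append("b")
--     return "".join(out)
-- ===== Notes on version B (the rewrite author's own statement) =====
-- stated objective: faster
-- what changed: A rescans the whole guess and solution for every yellow candidate (count plus two comprehension sums per position); B builds a per-letter budget dict in two linear passes (solution counts minus greens) and then assigns g/y/b in one left-to-right pass, decrementing the budget.
import Mathlib
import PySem

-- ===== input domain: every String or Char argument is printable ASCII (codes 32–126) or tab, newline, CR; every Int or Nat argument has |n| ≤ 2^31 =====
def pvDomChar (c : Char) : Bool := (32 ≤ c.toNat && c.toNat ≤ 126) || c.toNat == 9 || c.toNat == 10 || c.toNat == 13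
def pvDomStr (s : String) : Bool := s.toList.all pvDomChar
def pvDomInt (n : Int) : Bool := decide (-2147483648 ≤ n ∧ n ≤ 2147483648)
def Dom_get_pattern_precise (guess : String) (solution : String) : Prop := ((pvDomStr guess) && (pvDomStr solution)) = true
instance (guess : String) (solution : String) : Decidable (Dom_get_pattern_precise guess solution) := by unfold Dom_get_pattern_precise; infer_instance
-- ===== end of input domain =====

-- B replaces A's per-letter quadratic rescan (count + two comprehension sums per yellow
-- candidate) by a letter-budget dictionary built in two linear passes and consumed
-- left-to-right; same return value on all inputs where A returns.

-- ===== PORT A =====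
-- Loop body of A (one helper per Python loop; `letter in solution` and solution.count(letter)
-- are single-character membership/count, exact; `l == letter and l == solution[i]`
-- short-circuits in Python, so solution[i] is evaluated only when l == letter — on Pre_
-- every such index is in range and the ∧-condition below is exact).
def pvAstep (g s : List Char) (hint : List Char) (p : Int × Char) : List Char :=
  if ¬ (p.2 ∈ s) then hint ++ ['b']
  else if PySem.List.pyGet? s p.1 = some p.2 then hint ++ ['g']
  else
    let letter_solution : Int := s.count p.2
    let letter_green : Int := ((PySem.List.enumerate g 0).map (fun q =>
      if q.2 = p.2 ∧ PySem.List.pyGet? s q.1 = some q.2 then (1:Int) else 0)).sum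
    let letter_yellow_already : Int :=
      ((PySem.List.enumerate (PySem.List.slice g none (some p.1)) 0).map (fun q =>
        if q.2 = p.2 ∧ ¬ PySem.List.pyGet? s q.1 = some q.2 then (1:Int) else 0)).sum
    if letter_solution - letter_green - letter_yellow_already > 0 then hint ++ ['y']
    else hint ++ ['b']

def get_pattern_precise (guess : String) (solution : String) : String :=
  String.ofList ((PySem.List.enumerate guess.toList 0).foldl
    (pvAstep guess.toList solution.toList) [])

-- ===== PORT B =====
-- B's second loop (green budget subtraction) and third loop (hint emission); `c == solution[i]`
-- is only evaluated under the `i < n` guard, hence always in range.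
def pvBsub (s : List Char) (n : Int) (d : PySem.Dict Char Int) (p : Int × Char) : PySem.Dict Char Int :=
  if p.1 < n ∧ PySem.List.pyGet? s p.1 = some p.2 then d.modify p.2 0 (· - 1) else d

def pvBstep (s : List Char) (n : Int) (st : PySem.Dict Char Int × List Char) (p : Int × Char) :
    PySem.Dict Char Int × List Char :=
  if p.1 < n ∧ PySem.List.pyGet? s p.1 = some p.2 then (st.1, st.2 ++ ['g'])
  else if 0 < st.1.getD p.2 0 then (st.1.modify p.2 0 (· - 1), st.2 ++ ['y'])
  else (st.1, st.2 ++ ['b'])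

def get_pattern_precise_alt (guess : String) (solution : String) : String :=
  String.ofList ((PySem.List.enumerate guess.toList 0).foldl
    (pvBstep solution.toList (solution.toList.length : Int))
    ((PySem.List.enumerate guess.toList 0).foldl
      (pvBsub solution.toList (solution.toList.length : Int))
      (solution.toList.foldl (fun d c => d.insert c (d.getD c 0 + 1))
        (PySem.Dict.empty : PySem.Dict Char Int)), [])).2

-- ===== PRECONDITION & SPEC =====
-- Pre_ excludes exactly the inputs where Python A raises IndexError: a guess letter at an
-- index ≥ len(solution) that occurs in the solution (A returns on every other input).
def Pre_get_pattern_precise (guess : String) (solution : String) : Prop :=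
  ((guess.toList.drop solution.toList.length).all (fun c => !solution.toList.contains c)) = true
instance (guess : String) (solution : String) : Decidable (Pre_get_pattern_precise guess solution) := by
  unfold Pre_get_pattern_precise; infer_instance

def pvWitness_get_pattern_precise : String × String := ("ab", "ba")

def Spec_get_pattern_precise (guess : String) (solution : String) (out : String) : Prop := out = get_pattern_precise_alt guess solution
instance (guess : String) (solution : String) (out : String) : Decidable (Spec_get_pattern_precise guess solution out) := by unfold Spec_get_pattern_precise; infer_instance

-- ===== CLAIM (what is proved, stated in full; the proofs are below) =====
def Claim_equal_get_pattern_precise : Prop := ∀ (guess : String) (solution : String), Dom_get_pattern_precise guess solution → Pre_get_pattern_precise guess solution → Spec_get_pattern_precise guess solution (get_pattern_precise guess solution)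

-- ===== LEMMAS AND PROOFS =====

-- Abstract one-position step: the hint character emitted at position p when the per-letter
-- budget function is f, and the updated budget function.
def pvStepChar (s : List Char) (f : Char → Int) (p : Int × Char) : Char :=
  if PySem.List.pyGet? s p.1 = some p.2 then 'g' else if 0 < f p.2 then 'y' else 'b'

def pvStepF (s : List Char) (f : Char → Int) (p : Int × Char) : Char → Int :=
  fun c => if PySem.List.pyGet? s p.1 = some p.2 then f c
           else if c = p.2 then f c - 1 else f c

def pvEmit (s : List Char) (l : List (Int × Char)) (f : Char → Int) : List Char :=
  match l with
  | [] => []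
  | p :: t => pvStepChar s f p :: pvEmit s t (pvStepF s f p)

-- A's three sums, as functions of the processed prefix.
def pvNG (s : List Char) (pre : List (Int × Char)) (c : Char) : Int :=
  ((pre.map (fun q => if q.2 = c ∧ ¬ PySem.List.pyGet? s q.1 = some q.2 then (1:Int) else 0)).sum)

def pvGsum (s g : List Char) (c : Char) : Int :=
  ((PySem.List.enumerate g 0).map (fun q =>
    if q.2 = c ∧ PySem.List.pyGet? s q.1 = some q.2 then (1:Int) else 0)).sum

def pvF (s g : List Char) (pre : List (Int × Char)) (c : Char) : Int :=
  (s.count c : Int) - pvGsum s g c - pvNG s pre c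

lemma pv_sum_ite_nonneg {α : Type} (P : α → Prop) [DecidablePred P] (l : List α) :
    0 ≤ (l.map (fun q => if P q then (1:Int) else 0)).sum := by
  induction l with
  | nil => simp
  | cons x t ih => simp only [List.map_cons, List.sum_cons]; split <;> omega

lemma pvNG_nonneg (s : List Char) (pre : List (Int × Char)) (c : Char) : 0 ≤ pvNG s pre c :=
  pv_sum_ite_nonneg _ pre

lemma pvGsum_nonneg (s g : List Char) (c : Char) : 0 ≤ pvGsum s g c :=
  pv_sum_ite_nonneg _ (PySem.List.enumerate g 0)

lemma pvNG_append_singleton (s : List Char) (pre : List (Int × Char)) (p : Int × Char) (c : Char) :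
    pvNG s (pre ++ [p]) c
      = pvNG s pre c + (if p.2 = c ∧ ¬ PySem.List.pyGet? s p.1 = some p.2 then (1:Int) else 0) := by
  simp [pvNG]

lemma pv_green_mem (s : List Char) (i : Int) (c : Char)
    (h : PySem.List.pyGet? s i = some c) (h0 : 0 ≤ i) : i < s.length ∧ c ∈ s := by
  unfold PySem.List.pyGet? PySem.List.pyIdx? at h
  split at h
  · split at h
    · simp at h; exact ⟨by assumption, List.mem_of_getElem? h⟩
    · simp at h
  · omega

lemma pv_enumerate_take {α : Type} (xs : List α) (k : Nat) (st : Int) :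
    (PySem.List.enumerate xs st).take k = PySem.List.enumerate (xs.take k) st := by
  induction xs generalizing k st with
  | nil => simp [PySem.List.enumerate_nil]
  | cons x t ih =>
    cases k with
    | zero => simp [PySem.List.enumerate_nil]
    | succ m => simp [PySem.List.enumerate_cons, ih]

lemma pv_mem_enumerate_nonneg {α : Type} (g : List α) (p : Int × α)
    (hp : p ∈ PySem.List.enumerate g 0) : 0 ≤ p.1 := by
  rw [PySem.List.mem_enumerate_iff] at hp
  obtain ⟨k, hk, rfl⟩ := hp
  simp

-- A's loop, run from an arbitrary split of enumerate(guess), emits pvEmit.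
lemma pvA_loop (g s : List Char) (l pre : List (Int × Char)) (acc : List Char) (f : Char → Int)
    (hsplit : PySem.List.enumerate g 0 = pre ++ l)
    (hf : ∀ c, f c = pvF s g pre c) :
    l.foldl (pvAstep g s) acc = acc ++ pvEmit s l f := by
  induction l generalizing pre acc f with
  | nil => simp [pvEmit]
  | cons p t ih =>
    have hlen : pre.length < g.length := by
      have := congrArg List.length hsplit
      simp [PySem.List.length_enumerate] at this
      omega
    have hpe : pre.length < (PySem.List.enumerate g 0).length := by
      simp [PySem.List.length_enumerate]; exact hlen
    have hp : p = ((pre.length : Int), g[pre.length]) := by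
      have h1 : (PySem.List.enumerate g 0)[pre.length] = ((0:Int) + pre.length, g[pre.length]) :=
        PySem.List.getElem_enumerate g 0 pre.length hpe
      have h2 := List.getElem_of_eq hsplit hpe
      rw [h1, List.getElem_append_right (le_refl pre.length)] at h2
      simpa using h2.symm
    have hp1 : p.1 = (pre.length : Int) := by rw [hp]
    have hp2 : p.2 = g[pre.length] := by rw [hp]
    have hpre : pre = PySem.List.enumerate (g.take pre.length) 0 := by
      rw [← pv_enumerate_take g pre.length 0, hsplit, List.take_left]
    have hsplit' : PySem.List.enumerate g 0 = (pre ++ [p]) ++ t := by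
      rw [hsplit]; simp
    have hf' : ∀ c, pvStepF s f p c = pvF s g (pre ++ [p]) c := by
      intro c
      simp only [pvStepF, pvF, pvNG_append_singleton, hf c]
      by_cases hg : PySem.List.pyGet? s p.1 = some p.2
      · simp [hg]
      · by_cases hc : c = p.2
        · subst hc; simp [hg]; ring
        · simp [hg, hc, Ne.symm hc]
    have hstep : pvAstep g s acc p = acc ++ [pvStepChar s f p] := by
      unfold pvAstep pvStepChar
      by_cases hmem : p.2 ∈ s
      · simp only [hmem, not_true_eq_false, ite_false]
        by_cases hg : PySem.List.pyGet? s p.1 = some p.2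
        · simp [hg]
        · have hyellow :
              ((PySem.List.enumerate (PySem.List.slice g none (some p.1)) 0).map (fun q =>
                if q.2 = p.2 ∧ ¬ PySem.List.pyGet? s q.1 = some q.2 then (1:Int) else 0)).sum
              = pvNG s pre p.2 := by
            rw [hp1, PySem.List.slice_to g (b := (pre.length : Int)) (by positivity),
              Int.toNat_natCast]
            simp only [pvNG]
            rw [← hpre]
          simp only [if_neg hg]
          rw [hyellow]
          have hcond : ((s.count p.2 : Int) -
              ((PySem.List.enumerate g 0).map (fun q =>
                if q.2 = p.2 ∧ PySem.List.pyGet? s q.1 = some q.2 then (1:Int) else 0)).sum -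
              pvNG s pre p.2) = f p.2 := by
            rw [hf p.2]; rfl
          rw [hcond]
          by_cases hy : 0 < f p.2
          · simp [hy]
          · simp [hy]
      · simp only [hmem, not_false_eq_true, if_pos]
        have hg : ¬ PySem.List.pyGet? s p.1 = some p.2 := by
          intro hgg
          exact hmem (pv_green_mem s p.1 p.2 hgg (by rw [hp1]; positivity)).2
        have hy : ¬ 0 < f p.2 := by
          rw [hf p.2]
          have h0 : s.count p.2 = 0 := List.count_eq_zero.mpr hmem
          have := pvGsum_nonneg s g p.2
          have := pvNG_nonneg s pre p.2
          unfold pvF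
          omega
        simp [hg, hy]
    simp only [List.foldl_cons, pvEmit, hstep]
    rw [ih (pre ++ [p]) (acc ++ [pvStepChar s f p]) (pvStepF s f p) hsplit' hf']
    simp

-- the budget dictionary after B's first two loops holds exactly pvF s g [].
lemma pv_modify_loop (s : List Char) (l : List (Int × Char)) (d : PySem.Dict Char Int) (c : Char)
    (hpos : ∀ q ∈ l, 0 ≤ q.1) :
    (l.foldl (pvBsub s (s.length : Int)) d).getD c 0
      = d.getD c 0 - (l.map (fun q =>
          if q.2 = c ∧ PySem.List.pyGet? s q.1 = some q.2 then (1:Int) else 0)).sum := by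
  induction l generalizing d with
  | nil => simp
  | cons q t ih =>
    have hq : 0 ≤ q.1 := hpos q (by simp)
    have hpos' : ∀ r ∈ t, 0 ≤ r.1 := fun r hr => hpos r (by simp [hr])
    simp only [List.foldl_cons, List.map_cons, List.sum_cons]
    by_cases hg : PySem.List.pyGet? s q.1 = some q.2
    · have hlt : q.1 < (s.length : Int) := (pv_green_mem s q.1 q.2 hg hq).1
      rw [show pvBsub s (s.length : Int) d q = d.modify q.2 0 (· - 1) from by
        simp [pvBsub, hlt, hg]]
      rw [ih _ hpos', PySem.Dict.getD_modify]
      by_cases hc : q.2 = c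
      · subst hc; simp [hg]; ring
      · simp [hc, Ne.symm hc, hg]
    · rw [show pvBsub s (s.length : Int) d q = d from by simp [pvBsub, hg]]
      rw [ih _ hpos']
      simp [hg]

-- B's third loop emits pvEmit whenever the dictionary agrees with f where it matters.
lemma pvB_loop (s : List Char) (l : List (Int × Char)) (d : PySem.Dict Char Int)
    (acc : List Char) (f : Char → Int)
    (hpos : ∀ q ∈ l, 0 ≤ q.1)
    (hinv : ∀ c, (0 < d.getD c 0 ↔ 0 < f c) ∧ (0 < f c → d.getD c 0 = f c)) :
    (l.foldl (pvBstep s (s.length : Int)) (d, acc)).2 = acc ++ pvEmit s l f := by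
  induction l generalizing d acc f with
  | nil => simp [pvEmit]
  | cons p t ih =>
    have hp0 : 0 ≤ p.1 := hpos p (by simp)
    have hpos' : ∀ r ∈ t, 0 ≤ r.1 := fun r hr => hpos r (by simp [hr])
    simp only [List.foldl_cons, pvEmit]
    by_cases hg : PySem.List.pyGet? s p.1 = some p.2
    · have hlt : p.1 < (s.length : Int) := (pv_green_mem s p.1 p.2 hg hp0).1
      rw [show pvBstep s (s.length : Int) (d, acc) p = (d, acc ++ ['g']) from by
        simp [pvBstep, hlt, hg]]
      rw [ih _ _ _ hpos' hinv]
      have hsf : pvStepF s f p = f := funext fun c => by simp [pvStepF, hg]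
      simp [pvStepChar, hg, hsf]
    · have hng : ¬ (p.1 < (s.length : Int) ∧ PySem.List.pyGet? s p.1 = some p.2) := by
        intro h; exact hg h.2
      by_cases hy : 0 < f p.2
      · have hd : d.getD p.2 0 = f p.2 := (hinv p.2).2 hy
        rw [show pvBstep s (s.length : Int) (d, acc) p
              = (d.modify p.2 0 (· - 1), acc ++ ['y']) from by
          simp [pvBstep, hng, hd, hy]]
        rw [ih (d.modify p.2 0 (· - 1)) (acc ++ ['y']) (pvStepF s f p) hpos' (fun c => by
          rw [PySem.Dict.getD_modify]
          simp only [pvStepF, if_neg hg]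
          by_cases hc : c = p.2
          · subst hc; simp [hd]
          · simp [hc]; exact hinv c)]
        simp [pvStepChar, hg, hy]
      · have hd : ¬ 0 < d.getD p.2 0 := fun h => hy ((hinv p.2).1.mp h)
        rw [show pvBstep s (s.length : Int) (d, acc) p = (d, acc ++ ['b']) from by
          simp [pvBstep, hng, hd]]
        rw [ih d (acc ++ ['b']) (pvStepF s f p) hpos' (fun c => by
          simp only [pvStepF, if_neg hg]
          by_cases hc : c = p.2
          · subst hc
            exact ⟨by constructor <;> (intro h; omega), by intro h; omega⟩
          · simp only [if_neg hc]; exact hinv c)]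
        simp [pvStepChar, hg, hy]

-- ===== VERDICT (by name: the statement is the Claim_ definition above) =====
theorem get_pattern_precise_spec : Claim_equal_get_pattern_precise := by
  intro guess solution _ _
  unfold Spec_get_pattern_precise get_pattern_precise get_pattern_precise_alt
  have hpos := pv_mem_enumerate_nonneg guess.toList
  have hinit : ∀ c, ((PySem.List.enumerate guess.toList 0).foldl
      (pvBsub solution.toList (solution.toList.length : Int))
      (solution.toList.foldl (fun d c => d.insert c (d.getD c 0 + 1)) (PySem.Dict.empty : PySem.Dict Char Int))).getD c 0
      = pvF solution.toList guess.toList [] c := by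
    intro c
    rw [pv_modify_loop _ _ _ _ hpos]
    rw [PySem.Dict.getD_foldl_insert_add_one]
    simp [pvF, pvGsum, pvNG, PySem.Dict.getD_empty]
  rw [pvA_loop guess.toList solution.toList (PySem.List.enumerate guess.toList 0) [] []
        (pvF solution.toList guess.toList []) (by simp) (fun c => rfl)]
  rw [pvB_loop solution.toList (PySem.List.enumerate guess.toList 0) _ []
        (pvF solution.toList guess.toList []) hpos
        (fun c => by rw [hinit c]; exact ⟨Iff.rfl, fun _ => rfl⟩)]
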